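-- pv_equiv track=rewrite | github.com/Vormamim/intermediateUnitTest | main.py | highest_duplicate_number
-- ===== SOURCE A (Python) =====
-- def highest_duplicate_number(arr):
--     # Initialize a set to keep track of numbers seen so far
--     seen = set()
--
--     # Initialize a variable to keep track of the highest duplicate number found
--     highest_duplicate = -1
--
--     # Iterate over the array
--     for num in arr:
--         # Check if the number has already been seen
--         if num in seen:
--             # If the number is a duplicate and higher than the current highest duplicate,
--             # update the highest duplicate
--             if num > highest_duplicate:
--                 highest_duplicate = num
--         else:
--             # Add the number to the set of seen numbers
--             seen.add(num)
--
--     # Return the highest duplicate number found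
--     return highest_duplicate
-- ===== SOURCE B (Python) =====
-- def highest_duplicate_number(arr):
--     # Pass 1: full frequency table of all elements.
--     counts = {}
--     for num in arr:
--         counts[num] = counts.get(num, 0) + 1
--     # Pass 2: maximum over elements occurring more than once, floored at -1.
--     highest = -1
--     for num, c in counts.items():
--         if c > 1 and num > highest:
--             highest = num
--     return highest
-- ===== Notes on version B (the rewrite author's own statement) =====
-- stated objective: alternative
-- what changed: A's single scan maintaining a seen-set plus a running highest is replaced by a count-all-then-select decomposition: one pass builds a complete frequency table, a second pass takes the max over keys with count > 1.
import Mathlib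
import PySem

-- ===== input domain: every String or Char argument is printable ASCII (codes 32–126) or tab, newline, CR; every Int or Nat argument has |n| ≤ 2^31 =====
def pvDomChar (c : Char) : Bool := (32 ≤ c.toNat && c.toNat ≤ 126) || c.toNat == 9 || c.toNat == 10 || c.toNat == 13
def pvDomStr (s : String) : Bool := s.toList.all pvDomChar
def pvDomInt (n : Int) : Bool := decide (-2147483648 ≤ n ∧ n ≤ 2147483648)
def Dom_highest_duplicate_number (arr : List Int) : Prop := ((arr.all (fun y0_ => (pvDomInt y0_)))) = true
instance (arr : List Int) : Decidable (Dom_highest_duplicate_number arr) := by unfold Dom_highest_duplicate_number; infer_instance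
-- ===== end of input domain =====

-- B replaces A's one-pass seen-set + running-max scan by a count-all-then-select-max
-- decomposition (frequency table first, then a separate max pass); same cost, proven equal.


-- ===== PORT A =====
-- one pass: seen-set plus running highest duplicate
def highest_duplicate_number (arr : List Int) : Int :=
  (arr.foldl (fun st num =>
      if PySem.Set.contains st.1 num then
        (st.1, if num > st.2 then num else st.2)
      else
        (PySem.Set.add st.1 num, st.2))
    ((PySem.Set.empty : PySem.Set Int), (-1 : Int))).2

-- ===== PORT B =====
-- pass 1: full frequency table; pass 2: max over keys with count > 1, floored at -1
def highest_duplicate_number_alt (arr : List Int) : Int :=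
  (arr.foldl (fun d num => d.insert num (d.getD num 0 + 1))
      (PySem.Dict.empty : PySem.Dict Int Int)).items.foldl
    (fun hi p => if p.2 > 1 ∧ p.1 > hi then p.1 else hi) (-1)

-- ===== PRECONDITION & SPEC =====
def Spec_highest_duplicate_number (arr : List Int) (out : Int) : Prop := out = highest_duplicate_number_alt arr
instance (arr : List Int) (out : Int) : Decidable (Spec_highest_duplicate_number arr out) := by unfold Spec_highest_duplicate_number; infer_instance

-- ===== CLAIM (what is proved, stated in full; the proofs are below) =====
def Claim_equal_highest_duplicate_number : Prop := ∀ (arr : List Int), Dom_highest_duplicate_number arr → Spec_highest_duplicate_number arr (highest_duplicate_number arr)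

-- ===== LEMMAS AND PROOFS =====

-- A's loop body, named for the proofs (definitionally the lambda in the port)
def stepA (st : PySem.Set Int × Int) (num : Int) : PySem.Set Int × Int :=
  if PySem.Set.contains st.1 num then
    (st.1, if num > st.2 then num else st.2)
  else
    (PySem.Set.add st.1 num, st.2)

-- B's inner-loop body, named for the proofs
def stepB (hi : Int) (p : Int × Int) : Int :=
  if p.2 > 1 ∧ p.1 > hi then p.1 else hi

theorem portA_eq_stepA (arr : List Int) :
    highest_duplicate_number arr
      = (arr.foldl stepA ((PySem.Set.empty : PySem.Set Int), (-1 : Int))).2 := rfl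

-- Characterization of A's loop from an arbitrary state (seen, hi).
theorem loopA_char (l : List Int) : ∀ (seen : PySem.Set Int) (hi : Int),
    hi ≤ (l.foldl stepA (seen, hi)).2 ∧
    ((l.foldl stepA (seen, hi)).2 = hi ∨
      ((l.foldl stepA (seen, hi)).2 ∈ l ∧
        ((l.foldl stepA (seen, hi)).2 ∈ seen ∨ 2 ≤ l.count (l.foldl stepA (seen, hi)).2))) ∧
    (∀ x ∈ l, (x ∈ seen ∨ 2 ≤ l.count x) → x ≤ (l.foldl stepA (seen, hi)).2) := by
  induction l with
  | nil => intro seen hi; simp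
  | cons x xs ih =>
    intro seen hi
    by_cases hx : x ∈ seen
    · have hc : stepA (seen, hi) x = (seen, if x > hi then x else hi) := by
        unfold stepA; rw [if_pos ((PySem.Set.contains_iff seen x).mpr hx)]
      rw [List.foldl_cons, hc]
      by_cases hxhi : x > hi
      · rw [if_pos hxhi]
        obtain ⟨h1, h2, h3⟩ := ih seen x
        refine ⟨le_trans (le_of_lt hxhi) h1, ?_, ?_⟩
        · rcases h2 with h2 | ⟨hm, hs⟩
          · exact Or.inr ⟨by rw [h2]; exact List.mem_cons_self, Or.inl (by rw [h2]; exact hx)⟩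
          · refine Or.inr ⟨List.mem_cons_of_mem _ hm, ?_⟩
            rcases hs with hs | hs
            · exact Or.inl hs
            · right; rw [List.count_cons]; omega
        · intro y hy hcond
          rcases List.mem_cons.mp hy with rfl | hyxs
          · exact h1
          · refine h3 y hyxs ?_
            rcases hcond with h | h
            · exact Or.inl h
            · by_cases hyx : y = x
              · exact Or.inl (hyx ▸ hx)
              · right; rwa [List.count_cons_of_ne (Ne.symm hyx)] at h
      · rw [if_neg hxhi]
        obtain ⟨h1, h2, h3⟩ := ih seen hi
        refine ⟨h1, ?_, ?_⟩
        · rcases h2 with h2 | ⟨hm, hs⟩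
          · exact Or.inl h2
          · refine Or.inr ⟨List.mem_cons_of_mem _ hm, ?_⟩
            rcases hs with hs | hs
            · exact Or.inl hs
            · right; rw [List.count_cons]; omega
        · intro y hy hcond
          rcases List.mem_cons.mp hy with rfl | hyxs
          · exact le_trans (by omega) h1
          · refine h3 y hyxs ?_
            rcases hcond with h | h
            · exact Or.inl h
            · by_cases hyx : y = x
              · exact Or.inl (hyx ▸ hx)
              · right; rwa [List.count_cons_of_ne (Ne.symm hyx)] at h
    · have hc : stepA (seen, hi) x = (PySem.Set.add seen x, hi) := by
        unfold stepA
        rw [if_neg (fun h => hx ((PySem.Set.contains_iff seen x).mp h))]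
      rw [List.foldl_cons, hc]
      obtain ⟨h1, h2, h3⟩ := ih (PySem.Set.add seen x) hi
      refine ⟨h1, ?_, ?_⟩
      · rcases h2 with h2 | ⟨hm, hs⟩
        · exact Or.inl h2
        · refine Or.inr ⟨List.mem_cons_of_mem _ hm, ?_⟩
          rcases hs with hs | hs
          · rcases (PySem.Set.mem_add seen x _).mp hs with hs' | hs'
            · exact Or.inl hs'
            · right
              rw [hs', List.count_cons_self]
              have : 0 < xs.count x := List.count_pos_iff.mpr (hs' ▸ hm)
              omega
          · right; rw [List.count_cons]; omega
      · intro y hy hcond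
        rcases List.mem_cons.mp hy with rfl | hyxs
        · have h2c : 2 ≤ (y :: xs).count y := by
            rcases hcond with h | h
            · exact absurd h hx
            · exact h
          rw [List.count_cons_self] at h2c
          have hmem : y ∈ xs := List.count_pos_iff.mp (by omega)
          exact h3 y hmem (Or.inl ((PySem.Set.mem_add seen y y).mpr (Or.inr rfl)))
        · refine h3 y hyxs ?_
          rcases hcond with h | h
          · exact Or.inl ((PySem.Set.mem_add seen x y).mpr (Or.inl h))
          · by_cases hyx : y = x
            · exact Or.inl ((PySem.Set.mem_add seen x y).mpr (Or.inr hyx))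
            · right; rwa [List.count_cons_of_ne (Ne.symm hyx)] at h

-- Characterization of B's second loop over an arbitrary pair list.
theorem loopB_char (ps : List (Int × Int)) : ∀ (a : Int),
    a ≤ ps.foldl stepB a ∧
    (ps.foldl stepB a = a ∨ ∃ p ∈ ps, ps.foldl stepB a = p.1 ∧ 1 < p.2) ∧
    (∀ p ∈ ps, 1 < p.2 → p.1 ≤ ps.foldl stepB a) := by
  induction ps with
  | nil => intro a; simp
  | cons q qs ih =>
    intro a
    obtain ⟨h1, h2, h3⟩ := ih (stepB a q)
    rw [List.foldl_cons]
    have hstep : a ≤ stepB a q := by unfold stepB; split_ifs with h <;> omega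
    refine ⟨le_trans hstep h1, ?_, ?_⟩
    · rcases h2 with h2 | ⟨p, hp, hq⟩
      · by_cases hq : q.2 > 1 ∧ q.1 > a
        · rw [h2, stepB, if_pos hq]
          exact Or.inr ⟨q, List.mem_cons_self, rfl, hq.1⟩
        · rw [h2, stepB, if_neg hq]
          exact Or.inl rfl
      · exact Or.inr ⟨p, List.mem_cons_of_mem _ hp, hq⟩
    · intro p hp hgt
      rcases List.mem_cons.mp hp with rfl | hpqs
      · refine le_trans ?_ h1
        unfold stepB
        split_ifs with h
        · omega
        · rw [not_and_or] at h
          rcases h with h | h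
          · exact absurd hgt h
          · omega
      · exact h3 p hpqs hgt

-- B's frequency-table pass is Counter(arr); its items are (k, count k) over set(arr).
theorem alt_items (arr : List Int) :
    (arr.foldl (fun d num => d.insert num (d.getD num 0 + 1))
      (PySem.Dict.empty : PySem.Dict Int Int)).items
    = (PySem.Set.ofList arr).map (fun k => (k, (arr.count k : Int))) := by
  rw [PySem.Dict.foldl_insert_getD_add_one_eq_counter, PySem.Dict.items_counter]

theorem portB_eq_stepB (arr : List Int) :
    highest_duplicate_number_alt arr
      = ((PySem.Set.ofList arr).map (fun k => (k, (arr.count k : Int)))).foldl stepB (-1) := by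
  unfold highest_duplicate_number_alt
  rw [alt_items]
  rfl

-- ===== VERDICT (by name: the statement is the Claim_ definition above) =====
theorem highest_duplicate_number_spec : Claim_equal_highest_duplicate_number := by
  intro arr _
  unfold Spec_highest_duplicate_number
  rw [portA_eq_stepA, portB_eq_stepB]
  obtain ⟨a1, a2, a3⟩ := loopA_char arr PySem.Set.empty (-1)
  obtain ⟨b1, b2, b3⟩ := loopB_char ((PySem.Set.ofList arr).map (fun k => (k, (arr.count k : Int)))) (-1)
  apply le_antisymm
  · rcases a2 with h | ⟨hm, hs⟩
    · omega
    · rcases hs with hs | hc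
      · simp [PySem.Set.empty] at hs
      · have hset := (PySem.Set.mem_ofList arr _).mpr hm
        have hb := b3 (_, ((arr.count ((arr.foldl stepA (PySem.Set.empty, -1)).2) : Nat) : Int))
          (List.mem_map.mpr ⟨_, hset, rfl⟩)
          (by show (1 : Int) < ((arr.count _ : Nat) : Int); exact_mod_cast hc)
        exact hb
  · rcases b2 with h | ⟨p, hp, hpe, hpc⟩
    · omega
    · obtain ⟨k, hk, rfl⟩ := List.mem_map.mp hp
      have hk2 : k ∈ arr := (PySem.Set.mem_ofList arr k).mp hk
      have hc2 : 2 ≤ arr.count k := by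
        have : (1 : Int) < ((arr.count k : Nat) : Int) := hpc
        exact_mod_cast this
      rw [hpe]
      exact a3 k hk2 (Or.inr hc2)
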